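-- pv_equiv track=rewrite | github.com/dannyvi/toy-constant-product-swap | d.py | recur_D_improve
-- ===== SOURCE A (Python) =====
-- A_PRECISION = 100
--
-- def recur_D_improve(d, x, y, s, ann, iter, end):
--     d_prev = d
--     d = d * d * d // x // y // 4
--     new_d = (ann * s // A_PRECISION + d * 2) * d_prev // ((ann - A_PRECISION) * d_prev // A_PRECISION + 3 * d)
--     if d_prev < new_d <= d_prev + 1:
--         return new_d
--     if new_d <= d_prev <= new_d + 1:
--         return new_d
--     return recur_D_improve(new_d, x, y, s, ann, iter + 1, end)
-- ===== SOURCE B (Python) =====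
-- A_PRECISION = 100
--
-- def _newton_step(x, y, s, ann, d):
--     # one Newton step of the StableSwap invariant iteration
--     p = d * d * d // x // y // 4
--     num = (ann * s // A_PRECISION + 2 * p) * d
--     den = (ann - A_PRECISION) * d // A_PRECISION + 3 * p
--     return num // den
--
-- def recur_D_improve(d, x, y, s, ann, iter, end):
--     # iterate the step until successive values are within 1; iter/end are unused
--     while True:
--         nd = _newton_step(x, y, s, ann, d)
--         if -1 <= nd - d <= 1:
--             return nd
--         d = nd
-- ===== Notes on version B (the rewrite author's own statement) =====
-- stated objective: idiomatic
-- what changed: The tail recursion is replaced by a while-loop driving a separate one-step helper, with A's two chained comparison tests merged into the single equivalent test -1 <= new_d - d <= 1, and the unused iter/end parameters no longer threaded through calls.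
import Mathlib
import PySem

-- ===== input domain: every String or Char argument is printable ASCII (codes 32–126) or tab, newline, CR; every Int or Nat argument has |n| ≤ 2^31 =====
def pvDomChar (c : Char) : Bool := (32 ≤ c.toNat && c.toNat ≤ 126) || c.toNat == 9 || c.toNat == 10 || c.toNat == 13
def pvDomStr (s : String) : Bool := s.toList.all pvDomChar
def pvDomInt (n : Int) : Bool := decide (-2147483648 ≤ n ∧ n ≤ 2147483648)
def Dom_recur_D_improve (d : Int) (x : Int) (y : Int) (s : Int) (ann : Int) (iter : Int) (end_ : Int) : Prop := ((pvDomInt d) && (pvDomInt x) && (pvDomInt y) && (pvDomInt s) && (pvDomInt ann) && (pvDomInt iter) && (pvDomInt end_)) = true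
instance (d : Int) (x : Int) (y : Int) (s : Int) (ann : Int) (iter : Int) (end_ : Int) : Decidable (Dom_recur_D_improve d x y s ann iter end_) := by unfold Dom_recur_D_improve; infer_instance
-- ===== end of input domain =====

-- B replaces A's tail recursion by a while-loop over a separate one-step helper with a single merged convergence test (idiomatic; same cost).

-- ===== PORT A =====
-- A is an unbounded Python recursion; the Nat counter below is the recursion-depth budget (CPython's
-- recursion limit, 1000). Inside Pre_ (convergence within that budget) the 0-case is never reached.
def recur_D_improve_go : Nat → Int → Int → Int → Int → Int → Int → Int → Int
  | 0, _, _, _, _, _, _, _ => 0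
  | Nat.succ k, d, x, y, s, ann, iter, end_ =>
    let d_prev := d
    let d1 := PySem.Int.floordiv (PySem.Int.floordiv (PySem.Int.floordiv (d * d * d) x) y) 4
    let new_d := PySem.Int.floordiv ((PySem.Int.floordiv (ann * s) 100 + d1 * 2) * d_prev)
                   (PySem.Int.floordiv ((ann - 100) * d_prev) 100 + 3 * d1)
    if d_prev < new_d ∧ new_d ≤ d_prev + 1 then new_d
    else if new_d ≤ d_prev ∧ d_prev ≤ new_d + 1 then new_d
    else recur_D_improve_go k new_d x y s ann (iter + 1) end_

def recur_D_improve (d : Int) (x : Int) (y : Int) (s : Int) (ann : Int) (iter : Int) (end_ : Int) : Int :=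
  recur_D_improve_go 1000 d x y s ann iter end_

-- ===== PORT B =====
-- Source B's _newton_step helper: one Newton step of the invariant iteration.
def pvNewtonStep (x y s ann d : Int) : Int :=
  let p := PySem.Int.floordiv (PySem.Int.floordiv (PySem.Int.floordiv (d * d * d) x) y) 4
  let num := (PySem.Int.floordiv (ann * s) 100 + 2 * p) * d
  let den := PySem.Int.floordiv ((ann - 100) * d) 100 + 3 * p
  PySem.Int.floordiv num den

-- Source B's `while True` loop as a generic bounded iterate-until-within-1 combinator; the same
-- depth budget as port A bounds the loop and is never exhausted inside Pre_.
def pvIterUntil (f : Int → Int) : Nat → Int → Int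
  | 0, _ => 0
  | Nat.succ k, d =>
    let nd := f d
    if -1 ≤ nd - d ∧ nd - d ≤ 1 then nd else pvIterUntil f k nd

def recur_D_improve_alt (d : Int) (x : Int) (y : Int) (s : Int) (ann : Int) (iter : Int) (end_ : Int) : Int :=
  pvIterUntil (pvNewtonStep x y s ann) 1000 d

-- ===== PRECONDITION & SPEC =====
-- pvConv n d x y s ann = true iff the Newton recurrence started at d meets its ±1 stopping band within n
-- steps while every divisor along the way is nonzero. Pre_ below excludes exactly the inputs on which
-- Python A raises instead of returning: ZeroDivisionError (x = 0, y = 0 or a zero denominator at some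
-- step) or RecursionError (the recurrence cycles / does not stop within CPython's recursion limit, 1000).
def pvConv (n : Nat) (d x y s ann : Int) : Bool := match n with | 0 => false | Nat.succ k => if x = 0 ∨ y = 0 then false else (let d1 := PySem.Int.floordiv (PySem.Int.floordiv (PySem.Int.floordiv (d * d * d) x) y) 4; let den := PySem.Int.floordiv ((ann - 100) * d) 100 + 3 * d1; if den = 0 then false else (let nd := PySem.Int.floordiv ((PySem.Int.floordiv (ann * s) 100 + d1 * 2) * d) den; if (nd - d).natAbs ≤ 1 then true else pvConv k nd x y s ann))

def Pre_recur_D_improve (d : Int) (x : Int) (y : Int) (s : Int) (ann : Int) (iter : Int) (end_ : Int) : Prop :=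
  pvConv 1000 d x y s ann = true
instance (d : Int) (x : Int) (y : Int) (s : Int) (ann : Int) (iter : Int) (end_ : Int) : Decidable (Pre_recur_D_improve d x y s ann iter end_) := by unfold Pre_recur_D_improve; infer_instance

def pvWitness_recur_D_improve : Int × Int × Int × Int × Int × Int × Int := (10, 1, 1, 20, 300, 0, 255)

def Spec_recur_D_improve (d : Int) (x : Int) (y : Int) (s : Int) (ann : Int) (iter : Int) (end_ : Int) (out : Int) : Prop := out = recur_D_improve_alt d x y s ann iter end_
instance (d : Int) (x : Int) (y : Int) (s : Int) (ann : Int) (iter : Int) (end_ : Int) (out : Int) : Decidable (Spec_recur_D_improve d x y s ann iter end_ out) := by unfold Spec_recur_D_improve; infer_instance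

-- ===== CLAIM (what is proved, stated in full; the proofs are below) =====
def Claim_equal_recur_D_improve : Prop := ∀ (d : Int) (x : Int) (y : Int) (s : Int) (ann : Int) (iter : Int) (end_ : Int), Dom_recur_D_improve d x y s ann iter end_ → Pre_recur_D_improve d x y s ann iter end_ → Spec_recur_D_improve d x y s ann iter end_ (recur_D_improve d x y s ann iter end_)

-- ===== LEMMAS AND PROOFS =====

-- One Newton step computes the same new_d in both ports (d1*2 vs 2*p), and A's two chained-comparison
-- tests (d_prev < new_d ≤ d_prev+1, new_d ≤ d_prev ≤ new_d+1) together say -1 ≤ new_d - d_prev ≤ 1.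
-- By induction on the shared depth budget the two ports agree on every input.
theorem recur_D_improve_go_eq_iter (n : Nat) : ∀ (d x y s ann iter end_ : Int),
    recur_D_improve_go n d x y s ann iter end_ = pvIterUntil (pvNewtonStep x y s ann) n d := by
  induction n with
  | zero => intro d x y s ann iter end_; rfl
  | succ k ih =>
    intro d x y s ann iter end_
    simp only [recur_D_improve_go, pvIterUntil, pvNewtonStep, Int.mul_comm 2]
    split_ifs <;> first | rfl | omega | exact ih _ x y s ann (iter + 1) end_

-- ===== VERDICT (by name: the statement is the Claim_ definition above) =====
theorem recur_D_improve_spec : Claim_equal_recur_D_improve := by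
  intro d x y s ann iter end_ _ _
  unfold Spec_recur_D_improve recur_D_improve recur_D_improve_alt
  exact recur_D_improve_go_eq_iter 1000 d x y s ann iter end_
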